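-- pv_equiv track=rewrite | github.com/codeperfectplus/competitive-programming-solution | miscellaneous/Policemen-catch-thieves/police_catch_thieves.py | police_catch_thieves
-- ===== SOURCE A (Python) =====
-- def police_catch_thieves(arr, k):
--     """
--
--     arr: array of police thieves index
--     k: max distance police can catch thieves
--      """
--     n = len(arr)
--
--     i = 0
--     l = 0
--     r = 0
--     res = 0
--     thi = []
--     pol = []
--
--     # store indices in list
--     while i < n:
--         if arr[i] == 'P':
--             pol.append(i)
--         elif arr[i] == 'T':
--             thi.append(i)
--         i += 1
--
--     # track lowest current indices of thief
--     while l < len(thi) and r < len(pol):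
--
--         if (abs(thi[l] - pol[r]) <= k):
--             res += 1
--             l += 1
--             r += 1
--
--         # increment the minimum index
--         elif thi[l] < pol[r]:
--             l += 1
--         else:
--             r += 1
--
--     return res
-- ===== SOURCE B (Python) =====
-- def police_catch_thieves(arr, k):
--     """Single left-to-right pass: pending in-range indices are kept in two
--     FIFO queues; each new 'P'/'T' evicts out-of-window opposite entries
--     (index < i - k) and greedily matches the queue front."""
--     pol_q, thi_q = [], []
--     res = 0
--     for i, c in enumerate(arr):
--         if c == 'P':
--             while thi_q and thi_q[0] < i - k:
--                 thi_q.pop(0)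
--             if thi_q:
--                 thi_q.pop(0)
--                 res += 1
--             else:
--                 pol_q.append(i)
--         elif c == 'T':
--             while pol_q and pol_q[0] < i - k:
--                 pol_q.pop(0)
--             if pol_q:
--                 pol_q.pop(0)
--                 res += 1
--             else:
--                 thi_q.append(i)
--     return res
-- ===== Notes on version B (the rewrite author's own statement) =====
-- stated objective: alternative
-- what changed: Replaces A's two-phase algorithm (bucket all police/thief indices into two lists, then a two-pointer merge over them) by a single left-to-right scan that keeps two FIFO queues of pending unmatched indices, evicting out-of-window fronts (index < i-k) and matching greedily as each 'P'/'T' arrives.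
import Mathlib
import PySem

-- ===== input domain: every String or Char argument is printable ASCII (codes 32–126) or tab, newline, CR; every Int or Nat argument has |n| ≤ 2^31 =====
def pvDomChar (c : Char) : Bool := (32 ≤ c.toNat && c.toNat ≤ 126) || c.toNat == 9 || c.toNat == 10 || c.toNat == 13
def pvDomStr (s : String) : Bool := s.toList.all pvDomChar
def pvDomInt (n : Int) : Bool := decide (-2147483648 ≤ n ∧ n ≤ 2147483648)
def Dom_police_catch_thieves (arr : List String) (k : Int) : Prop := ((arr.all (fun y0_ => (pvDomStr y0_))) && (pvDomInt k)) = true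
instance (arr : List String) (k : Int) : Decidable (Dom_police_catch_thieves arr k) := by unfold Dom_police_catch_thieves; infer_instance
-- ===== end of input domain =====

-- B replaces A's bucket-then-two-pointer-merge by a single scan with two pending-index
-- queues (evict front below i-k, greedy match); alternative decomposition, same O(n) cost.


-- ===== PORT A =====
-- first while loop of A: classify each index i into the pol / thi lists (in scan order)
def pctCollect : List String → Int → List Int × List Int
  | [], _ => ([], [])
  | c :: cs, i =>
    let (pol, thi) := pctCollect cs (i + 1)
    if c = "P" then (i :: pol, thi)
    else if c = "T" then (pol, i :: thi)
    else (pol, thi)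

-- second while loop of A: two pointers l, r rendered as the suffixes of thi / pol
def pctMatch (k : Int) : List Int → List Int → Int → Int
  | t :: ts, p :: ps, res =>
    if |t - p| ≤ k then pctMatch k ts ps (res + 1)
    else if t < p then pctMatch k ts (p :: ps) res
    else pctMatch k (t :: ts) ps res
  | _, _, res => res
termination_by ts ps _ => ts.length + ps.length
decreasing_by all_goals simp <;> omega

def police_catch_thieves (arr : List String) (k : Int) : Int :=
  let (pol, thi) := pctCollect arr 0
  pctMatch k thi pol 0

-- ===== PORT B =====
-- Source B's inner "while q and q[0] < bound: q.pop(0)" eviction loop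
def pctEvict (bound : Int) : List Int → List Int
  | [] => []
  | x :: xs => if x < bound then pctEvict bound xs else x :: xs

-- Source B's single for-loop over enumerate(arr) with state (pol_q, thi_q, res)
def pctScan (k : Int) : List String → Int → List Int → List Int → Int → Int
  | [], _, _, _, res => res
  | c :: cs, i, polq, thiq, res =>
    if c = "P" then
      match pctEvict (i - k) thiq with
      | _ :: ts => pctScan k cs (i + 1) polq ts (res + 1)
      | [] => pctScan k cs (i + 1) (polq ++ [i]) [] res
    else if c = "T" then
      match pctEvict (i - k) polq with
      | _ :: ps => pctScan k cs (i + 1) ps thiq (res + 1)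
      | [] => pctScan k cs (i + 1) [] (thiq ++ [i]) res
    else pctScan k cs (i + 1) polq thiq res

def police_catch_thieves_alt (arr : List String) (k : Int) : Int :=
  pctScan k arr 0 [] [] 0

-- ===== PRECONDITION & SPEC =====
def Spec_police_catch_thieves (arr : List String) (k : Int) (out : Int) : Prop := out = police_catch_thieves_alt arr k
instance (arr : List String) (k : Int) (out : Int) : Decidable (Spec_police_catch_thieves arr k out) := by unfold Spec_police_catch_thieves; infer_instance

-- ===== CLAIM (what is proved, stated in full; the proofs are below) =====
def Claim_equal_police_catch_thieves : Prop := ∀ (arr : List String) (k : Int), Dom_police_catch_thieves arr k → Spec_police_catch_thieves arr k (police_catch_thieves arr k)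

-- ===== LEMMAS AND PROOFS =====

-- accumulator lemma for A's match loop
theorem pctMatch_acc (k : Int) : ∀ (ts ps : List Int) (res : Int),
    pctMatch k ts ps res = res + pctMatch k ts ps 0 := by
  intro ts ps
  induction ts generalizing ps with
  | nil => intro res; simp [pctMatch]
  | cons t ts ih =>
    intro res
    induction ps generalizing res with
    | nil => simp [pctMatch]
    | cons p ps ihp =>
      simp only [pctMatch]
      split_ifs with h1 h2
      · rw [ih ps (res + 1), ih ps (0 + 1)]; omega
      · rw [ih (p :: ps) res]
      · rw [ihp res]

-- A's match loop against a queue of old thief indices (all < i) and police head i: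
-- it drops exactly the out-of-window prefix, then matches the front if any survives.
theorem pctMatch_evict_thi (k i : Int) (L P : List Int) :
    ∀ (tq : List Int) (res : Int), (∀ x ∈ tq, x < i) →
    pctMatch k (tq ++ L) (i :: P) res =
      (match pctEvict (i - k) tq with
       | [] => pctMatch k L (i :: P) res
       | _ :: ts => pctMatch k (ts ++ L) P (res + 1)) := by
  intro tq
  induction tq with
  | nil => intro res _; simp [pctEvict]
  | cons x xs ih =>
    intro res hb
    have hxi : x < i := hb x (by simp)
    by_cases hx : x < i - k
    · have habs : ¬ |x - i| ≤ k := by rw [abs_sub_comm, abs_of_pos (by omega)]; omega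
      simp only [List.cons_append, pctMatch, if_neg habs, if_pos hxi]
      rw [ih res (fun y hy => hb y (by simp [hy]))]
      simp [pctEvict, hx]
    · have habs : |x - i| ≤ k := by rw [abs_sub_comm, abs_of_pos (by omega)]; omega
      simp only [List.cons_append, pctMatch, if_pos habs]
      simp [pctEvict, hx]

-- symmetric: old police indices (all < i) against thief head i
theorem pctMatch_evict_pol (k i : Int) (L P : List Int) :
    ∀ (pq : List Int) (res : Int), (∀ x ∈ pq, x < i) →
    pctMatch k (i :: L) (pq ++ P) res =
      (match pctEvict (i - k) pq with
       | [] => pctMatch k (i :: L) P res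
       | _ :: ps => pctMatch k L (ps ++ P) (res + 1)) := by
  intro pq
  induction pq with
  | nil => intro res _; simp [pctEvict]
  | cons x xs ih =>
    intro res hb
    have hxi : x < i := hb x (by simp)
    by_cases hx : x < i - k
    · have habs : ¬ |i - x| ≤ k := by rw [abs_of_pos (by omega)]; omega
      have hlt : ¬ i < x := by omega
      simp only [List.cons_append, pctMatch, if_neg habs, if_neg hlt]
      rw [ih res (fun y hy => hb y (by simp [hy]))]
      simp [pctEvict, hx]
    · have habs : |i - x| ≤ k := by rw [abs_of_pos (by omega)]; omega
      simp only [List.cons_append, pctMatch, if_pos habs]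
      simp [pctEvict, hx]

-- evicting only removes elements, so bounds are preserved
theorem pctEvict_subset (bound : Int) : ∀ (q : List Int) (x : Int), x ∈ pctEvict bound q → x ∈ q := by
  intro q
  induction q with
  | nil => simp [pctEvict]
  | cons y ys ih =>
    intro x hx
    by_cases hy : y < bound
    · simp only [pctEvict, if_pos hy] at hx
      exact List.mem_cons_of_mem _ (ih x hx)
    · simpa [pctEvict, hy] using hx

theorem pctMatch_nil_left (k : Int) (ps : List Int) (res : Int) : pctMatch k [] ps res = res := by
  cases ps <;> simp [pctMatch]

theorem pctMatch_nil_right (k : Int) (ts : List Int) (res : Int) : pctMatch k ts [] res = res := by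
  cases ts <;> simp [pctMatch]

-- MAIN INVARIANT: B's scan state (polq, thiq, res) over the remaining suffix equals
-- res plus A's match on the queues prepended to the suffix's own index lists.
theorem pctScan_eq (k : Int) : ∀ (rest : List String) (i : Int) (polq thiq : List Int) (res : Int),
    (polq = [] ∨ thiq = []) → (∀ x ∈ polq, x < i) → (∀ x ∈ thiq, x < i) →
    pctScan k rest i polq thiq res =
      res + pctMatch k (thiq ++ (pctCollect rest i).2) (polq ++ (pctCollect rest i).1) 0 := by
  intro rest
  induction rest with
  | nil =>
    intro i polq thiq res hone hbp hbt
    rcases hone with h | h <;> subst h <;>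
      simp [pctScan, pctCollect, pctMatch_nil_left, pctMatch_nil_right]
  | cons c cs ih =>
    intro i polq thiq res hone hbp hbt
    by_cases hP : c = "P"
    · have hc : pctCollect (c :: cs) i = (i :: (pctCollect cs (i+1)).1, (pctCollect cs (i+1)).2) := by
        simp [pctCollect, hP]
      rw [hc]
      rcases hone with hpe | hte
      · -- polq = []: pol head of the match is i
        subst hpe
        rw [List.nil_append, pctMatch_evict_thi k i _ _ thiq 0 hbt]
        simp only [pctScan, if_pos hP]
        cases hev : pctEvict (i - k) thiq with
        | nil =>
          dsimp only [List.nil_append]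
          rw [ih (i+1) [i] [] res (Or.inr rfl) (by simp) (by simp)]
          simp
        | cons t ts =>
          dsimp only
          rw [ih (i+1) [] ts (res + 1) (Or.inl rfl) (by simp)
              (fun y hy => by
                have h1 := pctEvict_subset (i - k) thiq y (by rw [hev]; exact List.mem_cons_of_mem _ hy)
                have := hbt y h1; omega)]
          rw [pctMatch_acc k _ _ (0 + 1)]
          simp; omega
      · -- thiq = []: eviction is a no-op, B appends i to polq
        subst hte
        simp only [pctScan, if_pos hP, pctEvict]
        rw [ih (i+1) (polq ++ [i]) [] res (Or.inr rfl)
            (by intro y hy; rcases List.mem_append.1 hy with h | h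
                · have := hbp y h; omega
                · simp at h; omega)
            (by simp)]
        simp
    · by_cases hT : c = "T"
      · have hc : pctCollect (c :: cs) i = ((pctCollect cs (i+1)).1, i :: (pctCollect cs (i+1)).2) := by
          simp [pctCollect, hT]
        rw [hc]
        rcases hone with hpe | hte
        · -- polq = []: B appends i to thiq
          subst hpe
          simp only [pctScan, if_neg hP, if_pos hT, pctEvict]
          rw [ih (i+1) [] (thiq ++ [i]) res (Or.inl rfl) (by simp)
              (by intro y hy; rcases List.mem_append.1 hy with h | h
                  · have := hbt y h; omega
                  · simp at h; omega)]
          simp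
        · -- thiq = []: thi head of the match is i
          subst hte
          rw [List.nil_append, pctMatch_evict_pol k i _ _ polq 0 hbp]
          simp only [pctScan, if_neg hP, if_pos hT]
          cases hev : pctEvict (i - k) polq with
          | nil =>
            dsimp only [List.nil_append]
            rw [ih (i+1) [] [i] res (Or.inl rfl) (by simp) (by simp)]
            simp
          | cons p ps =>
            dsimp only
            rw [ih (i+1) ps [] (res + 1) (Or.inr rfl)
                (fun y hy => by
                  have h1 := pctEvict_subset (i - k) polq y (by rw [hev]; exact List.mem_cons_of_mem _ hy)
                  have := hbp y h1; omega)
                (by simp)]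
            rw [pctMatch_acc k _ _ (0 + 1)]
            simp; omega
      · have hc : pctCollect (c :: cs) i = pctCollect cs (i+1) := by
          rcases hpc : pctCollect cs (i+1) with ⟨pol, thi⟩
          simp [pctCollect, hpc, hP, hT]
        rw [hc]
        simp only [pctScan, if_neg hP, if_neg hT]
        exact ih (i+1) polq thiq res hone
          (fun y hy => by have := hbp y hy; omega)
          (fun y hy => by have := hbt y hy; omega)

-- ===== VERDICT (by name: the statement is the Claim_ definition above) =====
theorem police_catch_thieves_spec : Claim_equal_police_catch_thieves := by
  intro arr k _
  unfold Spec_police_catch_thieves police_catch_thieves police_catch_thieves_alt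
  rw [pctScan_eq k arr 0 [] [] 0 (Or.inl rfl) (by simp) (by simp)]
  simp
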